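-- pv_equiv track=rewrite | github.com/sminot/deenurp | deenurp/select.py | _merge_by_taxid
-- ===== SOURCE A (Python) =====
-- def _merge_by_taxid(it):
--     """
--     Given an iterable of (tax_id, [cluster_id, [cluster_id...]]) pairs, returns
--     sets of clusters to merge based on shared tax_ids.
--     """
--     d = {}
--     for tax_id, cluster_ids in it:
--         s = set(cluster_ids)
--
--         # For each cluster, add any previous clusterings to the working cluster
--         for cluster_id in cluster_ids:
--             if cluster_id in d:
--                 s |= d[cluster_id]
--
--         s = frozenset(s)
--         for cluster_id in s:
--             d[cluster_id] = s
--
--     return frozenset(d.values())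
-- ===== SOURCE B (Python) =====
-- def _merge_by_taxid(it):
--     """
--     Same result via a list of disjoint groups: each (tax_id, cluster_ids) pair
--     merges the groups it touches into one, placed at the first touched group's
--     position (no per-cluster dict, no rewriting of every member's entry).
--     """
--     groups = []  # disjoint, non-empty lists of cluster ids
--     for tax_id, cluster_ids in it:
--         members = []
--         seen = set()
--         for c in cluster_ids:
--             if c not in seen:
--                 members.append(c)
--                 seen.add(c)
--         hits = []  # the existing groups touched by this pair, in first-touch order
--         for c in cluster_ids:
--             for g in groups:
--                 if c in g:
--                     if g not in hits:
--                         hits.append(g)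
--                         for x in g:
--                             if x not in seen:
--                                 members.append(x)
--                                 seen.add(x)
--                     break
--         if hits:
--             new_groups = []
--             merged_done = False
--             for g in groups:
--                 if g in hits:
--                     if not merged_done:
--                         new_groups.append(members)
--                         merged_done = True
--                 else:
--                     new_groups.append(g)
--             groups = new_groups
--         elif members:
--             groups.append(members)
--     return frozenset(frozenset(g) for g in groups)
-- ===== Notes on version B (the rewrite author's own statement) =====
-- stated objective: alternative
-- what changed: A keys a dict from every cluster id to its (repeatedly rewritten) merged frozenset and dedups the dict values at the end; B keeps a list of disjoint groups and, per pair, splices the merged group over the first group it touches, dropping the other touched groups.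
import Mathlib
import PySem

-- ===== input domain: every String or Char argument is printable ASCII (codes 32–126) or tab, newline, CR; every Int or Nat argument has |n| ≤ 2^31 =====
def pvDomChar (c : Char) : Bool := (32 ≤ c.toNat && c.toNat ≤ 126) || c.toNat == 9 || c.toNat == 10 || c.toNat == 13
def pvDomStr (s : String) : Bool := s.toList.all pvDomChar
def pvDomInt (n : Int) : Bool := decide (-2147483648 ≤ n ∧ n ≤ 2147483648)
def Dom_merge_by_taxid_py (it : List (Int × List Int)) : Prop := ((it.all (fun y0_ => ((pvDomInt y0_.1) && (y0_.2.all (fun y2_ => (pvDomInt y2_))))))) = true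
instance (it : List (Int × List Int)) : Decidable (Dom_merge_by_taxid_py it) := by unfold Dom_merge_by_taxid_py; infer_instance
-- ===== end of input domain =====

-- B replaces A's per-cluster dict (which rewrites every member's entry on each merge)
-- by a list of disjoint groups merged in place: alternative decomposition, same result.
-- Python sets/frozensets are PySem.Set lists (distinct elements, first-insertion order);
-- the outer frozensets of both returns are compared as finite sets by the harness.

-- ===== PORT A =====
def merge_by_taxid_py (it : List (Int × List Int)) : List (List Int) :=
  let d : PySem.Dict Int (List Int) :=
    it.foldl (fun d p =>
      -- s = set(cluster_ids)
      let s0 : PySem.Set Int := PySem.Set.ofList p.2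
      -- for cluster_id in cluster_ids: if cluster_id in d: s |= d[cluster_id]
      let s : PySem.Set Int :=
        p.2.foldl (fun s c =>
          match PySem.Dict.get? d c with
          | some g => PySem.Set.union s g
          | none => s) s0
      -- s = frozenset(s); for cluster_id in s: d[cluster_id] = s
      s.foldl (fun d c => PySem.Dict.insert d c s) d) PySem.Dict.empty
  -- frozenset(d.values())
  PySem.Set.ofList (PySem.Dict.values d)

-- ===== PORT B =====
def merge_by_taxid_py_alt (it : List (Int × List Int)) : List (List Int) :=
  it.foldl (fun groups p =>
    -- members/seen dedup loop (seen mirrors members: one PySem.Set holds both)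
    let members : PySem.Set Int := p.2.foldl PySem.Set.add PySem.Set.empty
    -- for c in cluster_ids: first group containing c; extend members, record hit
    let mh :=
      p.2.foldl (fun (mh : PySem.Set Int × List (List Int)) c =>
        match groups.find? (fun g => decide (c ∈ g)) with
        | some g =>
            if g ∈ mh.2 then mh
            else (PySem.Set.update mh.1 g, mh.2 ++ [g])
        | none => mh) (members, [])
    -- rebuild: merged group replaces the first hit group, other hits are dropped
    if mh.2 ≠ [] then
      (groups.foldl (fun (acc : List (List Int) × Bool) g =>
          if g ∈ mh.2 then (if acc.2 then acc else (acc.1 ++ [mh.1], true))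
          else (acc.1 ++ [g], acc.2)) ([], false)).1
    else if mh.1 ≠ [] then groups ++ [mh.1] else groups) []

-- ===== PRECONDITION & SPEC =====
def Spec_merge_by_taxid_py (it : List (Int × List Int)) (out : List (List Int)) : Prop := out = merge_by_taxid_py_alt it
instance (it : List (Int × List Int)) (out : List (List Int)) : Decidable (Spec_merge_by_taxid_py it out) := by unfold Spec_merge_by_taxid_py; infer_instance

-- ===== CLAIM (what is proved, stated in full; the proofs are below) =====
def Claim_equal_merge_by_taxid_py : Prop := ∀ (it : List (Int × List Int)), Dom_merge_by_taxid_py it → Spec_merge_by_taxid_py it (merge_by_taxid_py it)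

-- ===== LEMMAS AND PROOFS =====

theorem pvSet_add_mem {α : Type} [BEq α] [LawfulBEq α] {s : PySem.Set α} {x : α} (h : x ∈ s) : PySem.Set.add s x = s := by
  simp [PySem.Set.add, h]
theorem pvSet_update_subset {α : Type} [BEq α] [LawfulBEq α] (s : PySem.Set α) (l : List α) (h : ∀ x ∈ l, x ∈ s) :
    PySem.Set.update s l = s := by
  induction l generalizing s with
  | nil => rfl
  | cons c t ih =>
      have hc : c ∈ s := h c (by simp)
      show PySem.Set.update (PySem.Set.add s c) t = s
      rw [pvSet_add_mem hc]
      exact ih s (fun x hx => h x (by simp [hx]))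
def pvRF (p : List Int → Bool) (S : List Int) : List (List Int) → List (List Int)
  | [] => []
  | v :: t => if p v then S :: t.filter (fun x => !p x) else v :: pvRF p S t
theorem pvRF_no (p : List Int → Bool) (S : List Int) (w : List (List Int))
    (h : ∀ v ∈ w, p v = false) : pvRF p S w = w := by
  induction w with
  | nil => rfl
  | cons v t ih =>
      have hv := h v (by simp)
      simp [pvRF, hv]
      exact ih (fun x hx => h x (by simp [hx]))
theorem pvRF_append_neg (p : List Int → Bool) (S : List Int) (w : List (List Int)) (v : List Int)
    (hv : p v = false) : pvRF p S (w ++ [v]) = pvRF p S w ++ [v] := by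
  induction w with
  | nil => simp [pvRF, hv]
  | cons a t ih =>
      by_cases ha : p a = true
      · simp [pvRF, ha, List.filter_append, hv]
      · simp only [Bool.not_eq_true] at ha
        simp [pvRF, ha, ih]
theorem pvRF_append_pos_ex (p : List Int → Bool) (S : List Int) (w : List (List Int)) (v : List Int)
    (hex : ∃ x ∈ w, p x = true) (hv : p v = true) : pvRF p S (w ++ [v]) = pvRF p S w := by
  induction w with
  | nil => simp at hex
  | cons a t ih =>
      by_cases ha : p a = true
      · simp [pvRF, ha, List.filter_append, hv]
      · simp only [Bool.not_eq_true] at ha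
        have hex' : ∃ x ∈ t, p x = true := by
          rcases hex with ⟨x, hx, hpx⟩
          rcases List.mem_cons.mp hx with h | h
          · subst h; rw [hpx] at ha; cases ha
          · exact ⟨x, h, hpx⟩
        simp [pvRF, ha, ih hex']
theorem pvRF_append_pos_nex (p : List Int → Bool) (S : List Int) (w : List (List Int)) (v : List Int)
    (hnex : ¬ ∃ x ∈ w, p x = true) (hv : p v = true) : pvRF p S (w ++ [v]) = w ++ [S] := by
  induction w with
  | nil => simp [pvRF, hv]
  | cons a t ih =>
      have ha : p a = false := by
        by_contra h
        exact hnex ⟨a, by simp, by simpa using h⟩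
      have hnex' : ¬ ∃ x ∈ t, p x = true := fun ⟨x, hx, hpx⟩ => hnex ⟨x, by simp [hx], hpx⟩
      simp [pvRF, ha, ih hnex']
theorem pvRF_mem (p : List Int → Bool) (S : List Int) (w : List (List Int)) (x : List Int)
    (h : x ∈ pvRF p S w) : x = S ∨ (x ∈ w ∧ p x = false) := by
  induction w with
  | nil => simp [pvRF] at h
  | cons a t ih =>
      by_cases ha : p a = true
      · simp [pvRF, ha] at h
        rcases h with h | h
        · exact Or.inl h
        · right
          exact ⟨by simp [h.1], h.2⟩
      · simp only [Bool.not_eq_true] at ha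
        simp [pvRF, ha] at h
        rcases h with h | h
        · subst h; exact Or.inr ⟨by simp, ha⟩
        · rcases ih h with h' | h'
          · exact Or.inl h'
          · exact Or.inr ⟨by simp [h'.1], h'.2⟩
theorem pvRF_mem_of (p : List Int → Bool) (S : List Int) (w : List (List Int)) (x : List Int)
    (hx : x ∈ w) (hp : p x = false) : x ∈ pvRF p S w := by
  induction w with
  | nil => simp at hx
  | cons a t ih =>
      by_cases ha : p a = true
      · have hxt : x ∈ t := by
          rcases List.mem_cons.mp hx with h | h
          · subst h; rw [hp] at ha; cases ha
          · exact h
        show x ∈ if p a then S :: t.filter (fun x => !p x) else a :: pvRF p S t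
        rw [if_pos ha]
        refine List.mem_cons.mpr (Or.inr ?_)
        exact List.mem_filter.mpr ⟨hxt, by simp [hp]⟩
      · simp only [Bool.not_eq_true] at ha
        rcases List.mem_cons.mp hx with h | h
        · subst h; simp [pvRF, ha]
        · simp [pvRF, ha, ih h]
theorem pvRF_S_mem (p : List Int → Bool) (S : List Int) (w : List (List Int))
    (hex : ∃ x ∈ w, p x = true) : S ∈ pvRF p S w := by
  induction w with
  | nil => simp at hex
  | cons a t ih =>
      by_cases ha : p a = true
      · simp [pvRF, ha]
      · simp only [Bool.not_eq_true] at ha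
        have hex' : ∃ x ∈ t, p x = true := by
          rcases hex with ⟨x, hx, hpx⟩
          rcases List.mem_cons.mp hx with h | h
          · subst h; rw [hpx] at ha; cases ha
          · exact ⟨x, h, hpx⟩
        simp [pvRF, ha, ih hex']
theorem pvSet_add_not_mem {α : Type} [BEq α] [LawfulBEq α] {s : PySem.Set α} {x : α} (h : ¬ x ∈ s) : PySem.Set.add s x = s ++ [x] := by
  simp [PySem.Set.add, h]
theorem pvUpdate_cons {α : Type} [BEq α] [LawfulBEq α] (s : PySem.Set α) (v : α) (l : List α) :
    PySem.Set.update s (v :: l) = PySem.Set.update (PySem.Set.add s v) l := rfl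
theorem pvOfList_map_replace (p : List Int → Bool) (S : List Int) :
    ∀ (vs u w : List (List Int)),
      u = pvRF p S w →
      (∀ x ∈ w, x = S → p x = true) →
      (∀ v ∈ vs, p v = false → v ≠ S) →
      PySem.Set.update u (vs.map (fun v => if p v then S else v)) = pvRF p S (PySem.Set.update w vs) := by
  intro vs
  induction vs with
  | nil => intro u w hu _ _; exact hu
  | cons v vs ih =>
      intro u w hu hw2 hneq
      have hneq' : ∀ x ∈ vs, p x = false → x ≠ S := fun x hx => hneq x (by simp [hx])
      by_cases hpv : p v = true
      · -- f v = S
        have hfv : (if p v then S else v) = S := by simp [hpv]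
        show PySem.Set.update (PySem.Set.add u (if p v then S else v)) (vs.map _) = _
        rw [hfv]
        by_cases hex : ∃ x ∈ w, p x = true
        · have hS : S ∈ u := hu ▸ pvRF_S_mem p S w hex
          rw [pvSet_add_mem hS]
          by_cases hvw : v ∈ w
          · rw [show PySem.Set.update w (v :: vs) = PySem.Set.update w vs from by
              rw [pvUpdate_cons, pvSet_add_mem hvw]]
            exact ih u w hu hw2 hneq'
          · rw [pvUpdate_cons, pvSet_add_not_mem hvw]
            refine ih u (w ++ [v]) ?_ ?_ hneq'
            · rw [hu, pvRF_append_pos_ex p S w v hex hpv]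
            · intro x hx hxS
              rcases List.mem_append.mp hx with h | h
              · exact hw2 x h hxS
              · simp at h; subst h; exact hpv
        · have hall : ∀ x ∈ w, p x = false := by
            intro x hx
            by_contra h
            exact hex ⟨x, hx, by simpa using h⟩
          have huw : u = w := by rw [hu, pvRF_no p S w hall]
          have hSu : ¬ S ∈ u := by
            intro h
            rw [huw] at h
            exact hex ⟨S, h, hw2 S h rfl⟩
          rw [pvSet_add_not_mem hSu]
          have hvw : ¬ v ∈ w := by
            intro h
            exact hex ⟨v, h, hpv⟩
          rw [pvUpdate_cons, pvSet_add_not_mem hvw]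
          refine ih (u ++ [S]) (w ++ [v]) ?_ ?_ hneq'
          · rw [pvRF_append_pos_nex p S w v hex hpv, huw]
          · intro x hx hxS
            rcases List.mem_append.mp hx with h | h
            · exact hw2 x h hxS
            · simp at h; subst h; exact hpv
      · -- p v = false
        simp only [Bool.not_eq_true] at hpv
        have hfv : (if p v then S else v) = v := by simp [hpv]
        have hvS : v ≠ S := hneq v (by simp) hpv
        show PySem.Set.update (PySem.Set.add u (if p v then S else v)) (vs.map _) = _
        rw [hfv, pvUpdate_cons]
        by_cases hvw : v ∈ w
        · have hvu : v ∈ u := hu ▸ pvRF_mem_of p S w v hvw hpv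
          rw [pvSet_add_mem hvu, pvSet_add_mem hvw]
          exact ih u w hu hw2 hneq'
        · have hvu : ¬ v ∈ u := by
            intro h
            rcases pvRF_mem p S w v (hu ▸ h) with h' | h'
            · exact hvS h'
            · exact hvw h'.1
          rw [pvSet_add_not_mem hvu, pvSet_add_not_mem hvw]
          refine ih (u ++ [v]) (w ++ [v]) ?_ ?_ hneq'
          · rw [pvRF_append_neg p S w v hpv, hu]
          · intro x hx hxS
            rcases List.mem_append.mp hx with h | h
            · exact hw2 x h hxS
            · simp at h; subst h; exact absurd hxS hvS
theorem pvRebuild_go (H : List (List Int)) (S : List Int) :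
    ∀ (G acc : List (List Int)),
      ((G.foldl (fun (acc : List (List Int) × Bool) g =>
          if g ∈ H then (if acc.2 then acc else (acc.1 ++ [S], true))
          else (acc.1 ++ [g], acc.2)) (acc, false)).1
        = acc ++ pvRF (fun g => decide (g ∈ H)) S G) ∧
      ((G.foldl (fun (acc : List (List Int) × Bool) g =>
          if g ∈ H then (if acc.2 then acc else (acc.1 ++ [S], true))
          else (acc.1 ++ [g], acc.2)) (acc, true)).1
        = acc ++ G.filter (fun g => !decide (g ∈ H))) := by
  intro G
  induction G with
  | nil => intro acc; simp [pvRF]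
  | cons g t ih =>
      intro acc
      constructor
      · by_cases hg : g ∈ H
        · simp only [List.foldl_cons, if_pos hg, if_neg (by simp : ¬ (false = true))]
          rw [(ih (acc ++ [S])).2]
          simp [pvRF, hg]
        · simp only [List.foldl_cons, if_neg hg]
          rw [(ih (acc ++ [g])).1]
          simp [pvRF, hg]
      · by_cases hg : g ∈ H
        · simp only [List.foldl_cons, if_pos hg, reduceIte]
          rw [(ih acc).2]
          simp [hg]
        · simp only [List.foldl_cons, if_neg hg]
          rw [(ih (acc ++ [g])).2]
          simp [hg]
theorem pvGet?_foldl_insert_const (v : List Int) :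
    ∀ (l : List Int) (d : PySem.Dict Int (List Int)) (x : Int),
      PySem.Dict.get? (l.foldl (fun d c => PySem.Dict.insert d c v) d) x
        = if x ∈ l then some v else PySem.Dict.get? d x := by
  intro l
  induction l with
  | nil => intro d x; simp
  | cons c t ih =>
      intro d x
      rw [List.foldl_cons, ih]
      by_cases hxt : x ∈ t
      · simp [hxt]
      · by_cases hxc : x = c
        · simp [hxt, hxc, PySem.Dict.get?_insert]
        · simp [hxt, hxc, PySem.Dict.get?_insert]
theorem pvContains_of_mem_items (d : PySem.Dict Int (List Int)) (pr : Int × List Int)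
    (h : pr ∈ d.items) : d.contains pr.1 = true := by
  rw [PySem.Dict.contains_iff_mem_keys]
  exact PySem.Dict.mem_keys_of_mem_items d h
theorem pvItems_foldl_insert_const (v : List Int) :
    ∀ (l : List Int), l.Nodup → ∀ (d : PySem.Dict Int (List Int)),
      (l.foldl (fun d c => PySem.Dict.insert d c v) d).items
        = d.items.map (fun pr => if pr.1 ∈ l then (pr.1, v) else pr)
          ++ (l.filter (fun c => !(PySem.Dict.contains d c))).map (fun c => (c, v)) := by
  intro l
  induction l with
  | nil =>
      intro _ d
      simp
  | cons c t ih =>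
      intro hnd d
      have hct : ¬ c ∈ t := (List.nodup_cons.mp hnd).1
      have hnt : t.Nodup := (List.nodup_cons.mp hnd).2
      rw [List.foldl_cons, ih hnt]
      have hcont : ∀ x, (PySem.Dict.insert d c v).contains x = (x == c || d.contains x) :=
        fun x => PySem.Dict.contains_insert d c x v
      have hfilter : t.filter (fun x => !((PySem.Dict.insert d c v).contains x))
          = t.filter (fun x => !(d.contains x)) := by
        apply List.filter_congr
        intro x hx
        have hxc : ¬ x = c := fun h => hct (h ▸ hx)
        simp [hcont x, hxc]
      rw [hfilter, PySem.Dict.items_insert]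
      by_cases hc : d.contains c = true
      · rw [if_pos hc]
        rw [List.map_map]
        have hmap : ((fun pr => if pr.1 ∈ t then (pr.1, v) else pr) ∘
              (fun pr : Int × List Int => if (pr.1 == c) = true then (c, v) else pr))
            = (fun pr : Int × List Int => if pr.1 ∈ c :: t then (pr.1, v) else pr) := by
          funext pr
          by_cases hpc : pr.1 = c
          · simp [hpc]
          · simp [hpc]
        rw [hmap]
        have : (c :: t).filter (fun x => !(d.contains x)) = t.filter (fun x => !(d.contains x)) := by
          simp [hc]
        rw [this]
      · rw [if_neg hc]
        rw [List.map_append]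
        have h1 : d.items.map (fun pr => if pr.1 ∈ t then (pr.1, v) else pr)
            = d.items.map (fun pr => if pr.1 ∈ c :: t then (pr.1, v) else pr) := by
          apply List.map_congr_left
          intro pr hpr
          have : ¬ pr.1 = c := by
            intro h
            rw [← h] at hc
            exact hc (pvContains_of_mem_items d pr hpr)
          simp only [List.mem_cons]
          by_cases hpt : pr.1 ∈ t <;> simp [this, hpt]
        have h2 : (c :: t).filter (fun x => !(d.contains x)) = c :: t.filter (fun x => !(d.contains x)) := by
          simp [hc]
        rw [h1, h2]
        simp
def pvINV (d : PySem.Dict Int (List Int)) (G : List (List Int)) : Prop :=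
  PySem.Set.ofList (PySem.Dict.values d) = G ∧
  (∀ g ∈ G, ∀ c ∈ g, PySem.Dict.get? d c = some g) ∧
  (∀ c v, PySem.Dict.get? d c = some v → c ∈ v) ∧
  (PySem.Dict.keys d).Nodup
def pvSU (d : PySem.Dict Int (List Int)) (cs : List Int) (s : PySem.Set Int) : PySem.Set Int :=
  cs.foldl (fun s c =>
    match PySem.Dict.get? d c with
    | some g => PySem.Set.union s g
    | none => s) s
def pvMH (G : List (List Int)) (cs : List Int) (mh : PySem.Set Int × List (List Int)) :
    PySem.Set Int × List (List Int) :=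
  cs.foldl (fun mh c =>
    match G.find? (fun g => decide (c ∈ g)) with
    | some g =>
        if g ∈ mh.2 then mh
        else (PySem.Set.update mh.1 g, mh.2 ++ [g])
    | none => mh) mh
theorem pvGroup_of_get? (d : PySem.Dict Int (List Int)) (G : List (List Int)) (hinv : pvINV d G)
    (c : Int) (g : List Int) (h : PySem.Dict.get? d c = some g) : g ∈ G := by
  obtain ⟨ha, _, _, _⟩ := hinv
  have hit := PySem.Dict.mem_items_of_get?_eq_some d h
  have hv : g ∈ PySem.Dict.values d := by
    simp only [PySem.Dict.values]
    exact List.mem_map_of_mem hit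
  rw [← ha]
  exact (PySem.Set.mem_ofList _ _).mpr hv
theorem pvFind_eq_some (d : PySem.Dict Int (List Int)) (G : List (List Int)) (hinv : pvINV d G)
    (c : Int) (g : List Int) (h : PySem.Dict.get? d c = some g) :
    G.find? (fun g' => decide (c ∈ g')) = some g := by
  have hgG : g ∈ G := pvGroup_of_get? d G hinv c g h
  have hcg : c ∈ g := hinv.2.2.1 c g h
  have huniq : ∀ g' ∈ G, c ∈ g' → g' = g := by
    intro g' hg' hc
    exact Option.some.inj ((hinv.2.1 g' hg' c hc).symm.trans h)
  clear hinv h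
  induction G with
  | nil => cases hgG
  | cons a t ih =>
      by_cases hca : c ∈ a
      · rw [List.find?_cons_of_pos (h := by simpa using hca)]
        rw [huniq a (by simp) hca]
      · rw [List.find?_cons_of_neg (h := by simpa using hca)]
        have hgt : g ∈ t := by
          rcases List.mem_cons.mp hgG with h | h
          · subst h; exact absurd hcg hca
          · exact h
        exact ih hgt (fun g' hg' hc => huniq g' (by simp [hg']) hc)
theorem pvFind_eq_none (d : PySem.Dict Int (List Int)) (G : List (List Int)) (hinv : pvINV d G)
    (c : Int) (h : PySem.Dict.get? d c = none) :
    G.find? (fun g' => decide (c ∈ g')) = none := by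
  rw [List.find?_eq_none]
  intro g hg
  simp only [decide_eq_true_eq]
  intro hc
  rw [hinv.2.1 g hg c hc] at h
  cases h
theorem pvSU_nodup (d : PySem.Dict Int (List Int)) :
    ∀ (cs : List Int) (s : PySem.Set Int), s.Nodup → (pvSU d cs s).Nodup := by
  intro cs
  induction cs with
  | nil => intro s h; exact h
  | cons c t ih =>
      intro s h
      show (pvSU d t _).Nodup
      cases hg : PySem.Dict.get? d c with
      | none => simpa [pvSU, hg] using ih s h
      | some v =>
          have hn : (PySem.Set.union s v).Nodup := PySem.Set.nodup_update s v h
          simpa [pvSU, hg] using ih _ hn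
theorem pvLoop_spec (d : PySem.Dict Int (List Int)) (G : List (List Int)) (hinv : pvINV d G) :
    ∀ (cs : List Int) (s : PySem.Set Int) (hits : List (List Int)),
      (∀ g ∈ hits, g ∈ G ∧ ∀ x ∈ g, x ∈ s) →
      (pvMH G cs (s, hits)).1 = pvSU d cs s ∧
      (∀ g ∈ hits, g ∈ (pvMH G cs (s, hits)).2) ∧
      (∀ g ∈ (pvMH G cs (s, hits)).2, g ∈ G ∧ ∀ x ∈ g, x ∈ (pvMH G cs (s, hits)).1) ∧
      (∀ c ∈ cs, ∀ g, PySem.Dict.get? d c = some g → g ∈ (pvMH G cs (s, hits)).2) ∧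
      (∀ x ∈ (pvMH G cs (s, hits)).1, x ∈ s ∨ ∃ g ∈ (pvMH G cs (s, hits)).2, x ∈ g) ∧
      (∀ x ∈ s, x ∈ (pvMH G cs (s, hits)).1) := by
  intro cs
  induction cs with
  | nil =>
      intro s hits hpre
      refine ⟨rfl, fun g hg => hg, ?_, ?_, ?_, fun x hx => hx⟩
      · intro g hg; exact hpre g hg
      · intro c hc; cases hc
      · intro x hx; exact Or.inl hx
  | cons c t ih =>
      intro s hits hpre
      cases hget : PySem.Dict.get? d c with
      | none =>
          have hfind := pvFind_eq_none d G hinv c hget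
          have hmh : pvMH G (c :: t) (s, hits) = pvMH G t (s, hits) := by
            simp [pvMH, hfind]
          have hsu : pvSU d (c :: t) s = pvSU d t s := by
            simp [pvSU, hget]
          rw [hmh, hsu]
          obtain ⟨h1, h2, h3, h4, h5, h6⟩ := ih s hits hpre
          refine ⟨h1, h2, h3, ?_, h5, h6⟩
          intro c' hc' g hg
          rcases List.mem_cons.mp hc' with h | h
          · subst h; rw [hget] at hg; cases hg
          · exact h4 c' h g hg
      | some g =>
          have hfind := pvFind_eq_some d G hinv c g hget
          have hsu : pvSU d (c :: t) s = pvSU d t (PySem.Set.union s g) := by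
            simp [pvSU, hget]
          by_cases hgh : g ∈ hits
          · have hsub : PySem.Set.union s g = s :=
              pvSet_update_subset s g (hpre g hgh).2
            have hmh : pvMH G (c :: t) (s, hits) = pvMH G t (s, hits) := by
              simp [pvMH, hfind, hgh]
            rw [hmh, hsu, hsub]
            obtain ⟨h1, h2, h3, h4, h5, h6⟩ := ih s hits hpre
            refine ⟨h1, h2, h3, ?_, h5, h6⟩
            intro c' hc' g' hg'
            rcases List.mem_cons.mp hc' with h | h
            · subst h
              rw [hget] at hg'
              exact (Option.some.inj hg') ▸ h2 g hgh
            · exact h4 c' h g' hg'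
          · have hgG : g ∈ G := pvGroup_of_get? d G hinv c g hget
            have hmh : pvMH G (c :: t) (s, hits)
                = pvMH G t (PySem.Set.union s g, hits ++ [g]) := by
              simp [pvMH, hfind, hgh, PySem.Set.union]
            have hpre' : ∀ g' ∈ hits ++ [g], g' ∈ G ∧ ∀ x ∈ g', x ∈ PySem.Set.union s g := by
              intro g' hg'
              rcases List.mem_append.mp hg' with h | h
              · exact ⟨(hpre g' h).1, fun x hx =>
                  (PySem.Set.mem_update s g x).mpr (Or.inl ((hpre g' h).2 x hx))⟩
              · simp at h
                rw [h]
                exact ⟨hgG, fun x hx => (PySem.Set.mem_update s g x).mpr (Or.inr hx)⟩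
            obtain ⟨h1, h2, h3, h4, h5, h6⟩ := ih (PySem.Set.union s g) (hits ++ [g]) hpre'
            have hmono : ∀ g' ∈ hits, g' ∈ (pvMH G t (PySem.Set.union s g, hits ++ [g])).2 :=
              fun g' hg' => h2 g' (by simp [hg'])
            have hgin : g ∈ (pvMH G t (PySem.Set.union s g, hits ++ [g])).2 :=
              h2 g (by simp)
            rw [hmh, hsu]
            refine ⟨h1, hmono, h3, ?_, ?_, ?_⟩
            · intro c' hc' g' hg'
              rcases List.mem_cons.mp hc' with h | h
              · subst h
                rw [hget] at hg'
                exact (Option.some.inj hg') ▸ hgin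
              · exact h4 c' h g' hg'
            · intro x hx
              rcases h5 x hx with h | h
              · rcases (PySem.Set.mem_update s g x).mp h with h' | h'
                · exact Or.inl h'
                · exact Or.inr ⟨g, hgin, h'⟩
              · exact Or.inr h
            · intro x hx
              exact h6 x ((PySem.Set.mem_update s g x).mpr (Or.inl hx))
theorem pvOfList_append {α : Type} [BEq α] (l1 l2 : List α) :
    PySem.Set.ofList (l1 ++ l2) = PySem.Set.update (PySem.Set.ofList l1) l2 := by
  simp [PySem.Set.ofList, PySem.Set.update, List.foldl_append]
theorem pvUpdate_all_const {α : Type} [BEq α] [LawfulBEq α] (s : PySem.Set α) (l : List α) (S : α)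
    (hall : ∀ x ∈ l, x = S) (hne : l ≠ []) :
    PySem.Set.update s l = PySem.Set.add s S := by
  cases l with
  | nil => cases hne rfl
  | cons a t =>
      rw [show a = S from hall a (by simp), pvUpdate_cons]
      exact pvSet_update_subset _ t (fun x hx =>
        ((PySem.Set.mem_add s S x).mpr (Or.inr (hall x (by simp [hx])))))
def pvAStep (d : PySem.Dict Int (List Int)) (p : Int × List Int) : PySem.Dict Int (List Int) :=
  let s0 : PySem.Set Int := PySem.Set.ofList p.2
  let s : PySem.Set Int :=
    p.2.foldl (fun s c =>
      match PySem.Dict.get? d c with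
      | some g => PySem.Set.union s g
      | none => s) s0
  s.foldl (fun d c => PySem.Dict.insert d c s) d
def pvBStep (groups : List (List Int)) (p : Int × List Int) : List (List Int) :=
  let members : PySem.Set Int := p.2.foldl PySem.Set.add PySem.Set.empty
  let mh :=
    p.2.foldl (fun (mh : PySem.Set Int × List (List Int)) c =>
      match groups.find? (fun g => decide (c ∈ g)) with
      | some g =>
          if g ∈ mh.2 then mh
          else (PySem.Set.update mh.1 g, mh.2 ++ [g])
      | none => mh) (members, [])
  if mh.2 ≠ [] then
    (groups.foldl (fun (acc : List (List Int) × Bool) g =>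
        if g ∈ mh.2 then (if acc.2 then acc else (acc.1 ++ [mh.1], true))
        else (acc.1 ++ [g], acc.2)) ([], false)).1
  else if mh.1 ≠ [] then groups ++ [mh.1] else groups
theorem pvStep (d : PySem.Dict Int (List Int)) (G : List (List Int)) (p : Int × List Int)
    (hinv : pvINV d G) : pvINV (pvAStep d p) (pvBStep G p) := by
  obtain ⟨h1, h2, h3, h4, h5, h6⟩ :=
    pvLoop_spec d G hinv p.2 (PySem.Set.ofList p.2) [] (by intro g hg; cases hg)
  obtain ⟨ha, hb, hf, hk⟩ := hinv
  have hA : pvAStep d p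
      = (pvSU d p.2 (PySem.Set.ofList p.2)).foldl
          (fun dd c => PySem.Dict.insert dd c (pvSU d p.2 (PySem.Set.ofList p.2))) d := rfl
  rw [← h1] at hA
  -- abbreviations
  generalize hSS : (pvMH G p.2 (PySem.Set.ofList p.2, [])).1 = SS at *
  generalize hH : (pvMH G p.2 (PySem.Set.ofList p.2, [])).2 = H at *
  have hB : pvBStep G p
      = if H ≠ [] then
          (G.foldl (fun (acc : List (List Int) × Bool) g =>
              if g ∈ H then (if acc.2 then acc else (acc.1 ++ [SS], true))
              else (acc.1 ++ [g], acc.2)) ([], false)).1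
        else if SS ≠ [] then G ++ [SS] else G := by
    rw [← hSS, ← hH]; rfl
  have hSnd : SS.Nodup := by
    rw [h1]; exact pvSU_nodup d p.2 _ (PySem.Set.nodup_ofList p.2)
  have hget' : ∀ x, PySem.Dict.get? (pvAStep d p) x
      = if x ∈ SS then some SS else PySem.Dict.get? d x := by
    intro x; rw [hA]; exact pvGet?_foldl_insert_const SS SS d x
  have hknd : (PySem.Dict.keys (pvAStep d p)).Nodup := by
    rw [hA]
    exact PySem.Dict.nodup_keys_foldl_insert SS (fun _ _ => SS) d hk
  have hkeyS : ∀ k v, PySem.Dict.get? d k = some v → (k ∈ SS ↔ v ∈ H) := by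
    intro k v hkv
    constructor
    · intro hkS
      rcases h5 k hkS with h | ⟨g, hgH, hkg⟩
      · exact h4 k ((PySem.Set.mem_ofList p.2 k).mp h) v hkv
      · have := hb g (h3 g hgH).1 k hkg
        rw [this] at hkv
        exact (Option.some.inj hkv) ▸ hgH
    · intro hvH
      exact (h3 v hvH).2 k (hf k v hkv)
  have hvals : (pvAStep d p).values
      = (PySem.Dict.values d).map (fun v => if v ∈ H then SS else v)
        ++ (SS.filter (fun c => !(PySem.Dict.contains d c))).map (fun _ => SS) := by
    rw [hA]
    show ((SS.foldl (fun dd c => dd.insert c SS) d).items).map (fun x => x.2) = _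
    rw [pvItems_foldl_insert_const SS SS hSnd d]
    rw [List.map_append, List.map_map, List.map_map]
    congr 1
    · have hcg : ∀ pr ∈ d.items,
          ((fun (x : Int × List Int) => x.2) ∘ fun pr => if pr.1 ∈ SS then (pr.1, SS) else pr) pr
            = ((fun v => if v ∈ H then SS else v) ∘ (fun (x : Int × List Int) => x.2)) pr := by
        intro pr hpr
        have hg := PySem.Dict.get?_of_mem_items d hpr hk
        have hiff := hkeyS pr.1 pr.2 hg
        by_cases hpS : pr.1 ∈ SS
        · simp [hpS, hiff.mp hpS]
        · have hnH : ¬ pr.2 ∈ H := fun hh => hpS (hiff.mpr hh)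
          simp [hpS, hnH]
      rw [List.map_congr_left hcg]
      show _ = (d.items.map (fun x => x.2)).map _
      rw [List.map_map]
  by_cases hHe : H = []
  · -- no existing group touched
    have hnokey : ∀ x ∈ SS, PySem.Dict.get? d x = none := by
      intro x hx
      cases hg : PySem.Dict.get? d x with
      | none => rfl
      | some v =>
          have hvH := (hkeyS x v hg).mp hx
          rw [hHe] at hvH
          cases hvH
    by_cases hSe : SS = []
    · have hAd : pvAStep d p = d := by rw [hA, hSe]; rfl
      have hBG : pvBStep G p = G := by
        rw [hB, if_neg (by simp [hHe]), if_neg (by simp [hSe])]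
      refine ⟨?_, ?_, ?_, ?_⟩
      · rw [hAd, hBG]; exact ha
      · rw [hBG]
        intro g hg c hc
        rw [hAd]
        exact hb g hg c hc
      · intro c v h
        rw [hAd] at h
        exact hf c v h
      · exact hknd
    · -- a brand-new group is appended
      have hfid : (PySem.Dict.values d).map (fun v => if v ∈ H then SS else v)
          = PySem.Dict.values d := by
        have hcg : ∀ v ∈ PySem.Dict.values d, (if v ∈ H then SS else v) = id v := by
          intro v _
          rw [hHe]
          simp
        rw [List.map_congr_left hcg, List.map_id]
      have hfilt : SS.filter (fun c => !(PySem.Dict.contains d c)) = SS := by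
        apply List.filter_eq_self.mpr
        intro c hc
        have hcn := hnokey c hc
        have : ¬ PySem.Dict.contains d c = true := by
          rw [PySem.Dict.contains_iff_mem_keys]
          exact (PySem.Dict.get?_eq_none_iff_not_mem_keys d c).mp hcn
        simp [this]
      have hSnotG : ¬ SS ∈ G := by
        intro hSG
        obtain ⟨x, hx⟩ := List.exists_mem_of_ne_nil SS hSe
        have := hb SS hSG x hx
        rw [hnokey x hx] at this
        cases this
      have hBG : pvBStep G p = G ++ [SS] := by
        rw [hB, if_neg (by simp [hHe]), if_pos (by simp [hSe])]
      refine ⟨?_, ?_, ?_, hknd⟩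
      · rw [hvals, hfid, hfilt, pvOfList_append, ha, hBG]
        rw [pvUpdate_all_const G (SS.map fun _ => SS) SS
            (by intro x hx; simp at hx; exact hx.2.symm ▸ rfl)
            (by simp [hSe])]
        exact pvSet_add_not_mem hSnotG
      · rw [hBG]
        intro g hg c hc
        rw [hget' c]
        rcases List.mem_append.mp hg with hgG | hgS
        · have hcS : ¬ c ∈ SS := by
            intro hcs
            have := hb g hgG c hc
            rw [hnokey c hcs] at this
            cases this
          rw [if_neg hcS]
          exact hb g hgG c hc
        · simp at hgS
          rw [hgS] at hc ⊢
          rw [if_pos hc]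
      · intro c v h
        rw [hget' c] at h
        by_cases hcS : c ∈ SS
        · rw [if_pos hcS] at h
          exact (Option.some.inj h) ▸ hcS
        · rw [if_neg hcS] at h
          exact hf c v h
  · -- some groups were hit: merged set replaces the first of them
    have hneq : ∀ v ∈ PySem.Dict.values d, (fun g => decide (g ∈ H)) v = false → v ≠ SS := by
      intro v hv hdec hvS
      obtain ⟨pr, hpr, hpr2⟩ := List.mem_map.mp hv
      have hg := PySem.Dict.get?_of_mem_items d hpr hk
      rw [hpr2] at hg
      have hkv : pr.1 ∈ v := hf pr.1 v hg
      have : v ∈ H := (hkeyS pr.1 v hg).mp (hvS ▸ hkv)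
      simp [this] at hdec
    have hSinRF : SS ∈ pvRF (fun g => decide (g ∈ H)) SS G := by
      obtain ⟨g0, hg0⟩ := List.exists_mem_of_ne_nil H hHe
      exact pvRF_S_mem _ _ _ ⟨g0, (h3 g0 hg0).1, by simp [hg0]⟩
    have hBr : pvBStep G p = pvRF (fun g => decide (g ∈ H)) SS G := by
      rw [hB, if_pos (by simp [hHe])]
      rw [(pvRebuild_go H SS G []).1]
      simp
    refine ⟨?_, ?_, ?_, hknd⟩
    · rw [hvals, pvOfList_append, hBr]
      have hmap : PySem.Set.ofList ((PySem.Dict.values d).map (fun v => if v ∈ H then SS else v))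
          = pvRF (fun g => decide (g ∈ H)) SS G := by
        have hml := pvOfList_map_replace (fun g => decide (g ∈ H)) SS (PySem.Dict.values d) [] []
          rfl (by intro x hx; cases hx) hneq
        simp only [decide_eq_true_eq] at hml
        show PySem.Set.update [] _ = _
        rw [hml]
        show pvRF _ SS (PySem.Set.ofList (PySem.Dict.values d)) = _
        rw [ha]
      rw [hmap]
      apply pvSet_update_subset
      intro x hx
      obtain ⟨c, _, hc2⟩ := List.mem_map.mp hx
      rw [← hc2]
      exact hSinRF
    · rw [hBr]
      intro g hg c hc
      rw [hget' c]
      rcases pvRF_mem _ _ _ _ hg with hgS | ⟨hgG, hgp⟩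
      · rw [hgS] at hc ⊢
        rw [if_pos hc]
      · have hcS : ¬ c ∈ SS := by
          intro hcs
          have := (hkeyS c g (hb g hgG c hc)).mp hcs
          simp [this] at hgp
        rw [if_neg hcS]
        exact hb g hgG c hc
    · intro c v h
      rw [hget' c] at h
      by_cases hcS : c ∈ SS
      · rw [if_pos hcS] at h
        exact (Option.some.inj h) ▸ hcS
      · rw [if_neg hcS] at h
        exact hf c v h

theorem pvA_unfold (it : List (Int × List Int)) :
    merge_by_taxid_py it = PySem.Set.ofList (PySem.Dict.values (it.foldl pvAStep PySem.Dict.empty)) := rfl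

theorem pvB_unfold (it : List (Int × List Int)) :
    merge_by_taxid_py_alt it = it.foldl pvBStep [] := rfl

theorem pvMain : ∀ (it : List (Int × List Int)) (d : PySem.Dict Int (List Int)) (G : List (List Int)),
    pvINV d G → pvINV (it.foldl pvAStep d) (it.foldl pvBStep G) := by
  intro it
  induction it with
  | nil => intro d G h; exact h
  | cons p t ih => intro d G h; exact ih _ _ (pvStep d G p h)

-- ===== VERDICT (by name: the statement is the Claim_ definition above) =====
theorem merge_by_taxid_py_spec : Claim_equal_merge_by_taxid_py := by
  intro it _
  unfold Spec_merge_by_taxid_py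
  rw [pvA_unfold, pvB_unfold]
  have h0 : pvINV PySem.Dict.empty [] := by
    refine ⟨rfl, ?_, ?_, PySem.Dict.nodup_keys_empty⟩
    · intro g hg; cases hg
    · intro c v h; simp [PySem.Dict.get?, PySem.Dict.empty] at h
  exact (pvMain it PySem.Dict.empty [] h0).1
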